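-- pv_equiv track=rewrite | github.com/DrakonianMight/wxapp | utils/discover_aws_variables.py | generate_mapping_code
-- ===== SOURCE A (Python) =====
-- from typing import Dict, List, Set, Tuple
-- from collections import defaultdict
--
-- def generate_mapping_code(results: Dict) -> str:
--     """
--     Generate Python code to add to variable_mapper.py
--
--     Args:
--         results: Results from discover_all_variables()
--
--     Returns:
--         Python code string
--     """
--     code_lines = [
--         "# AWS API specific variable mappings (auto-discovered)",
--         "# Add these to the canonical_to_alternatives dictionary in VariableMapper:",
--         ""
--     ]
--
--     # Group suggestions by canonical name
--     by_canonical = defaultdict(set)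
--     for aws_var, canonical in results['suggested_mappings'].items():
--         by_canonical[canonical].add(aws_var)
--
--     for canonical in sorted(by_canonical.keys()):
--         aws_vars = sorted(by_canonical[canonical])
--         code_lines.append(f"# AWS API variables for {canonical}:")
--         code_lines.append(f"'{canonical}': {{")
--         code_lines.append(f"    '{canonical}',  # canonical name")
--         for var in aws_vars:
--             code_lines.append(f"    '{var}',  # AWS API")
--         code_lines.append(f"}},")
--         code_lines.append("")
--
--     return "\n".join(code_lines)
-- ===== SOURCE B (Python) =====
-- def generate_mapping_code(results):
--     items = list(results['suggested_mappings'].items())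
--
--     def block(c):
--         aws_vars = sorted(v for v, cc in items if cc == c)
--         return [f"# AWS API variables for {c}:",
--                 f"'{c}': {{",
--                 f"    '{c}',  # canonical name",
--                 *[f"    '{v}',  # AWS API" for v in aws_vars],
--                 "},",
--                 ""]
--
--     lines = ["# AWS API specific variable mappings (auto-discovered)",
--              "# Add these to the canonical_to_alternatives dictionary in VariableMapper:",
--              ""]
--     for c in sorted({c for _, c in items}):
--         lines += block(c)
--     return "\n".join(lines)
-- ===== Notes on version B (the rewrite author's own statement) =====
-- stated objective: simpler
-- what changed: B drops the defaultdict-of-sets grouping pass: it sorts the distinct canonical values once and builds each group's variable list by a direct filter over the item list, emitting each block with a list-comprehension helper instead of mutating a shared dict of sets.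
import Mathlib
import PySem

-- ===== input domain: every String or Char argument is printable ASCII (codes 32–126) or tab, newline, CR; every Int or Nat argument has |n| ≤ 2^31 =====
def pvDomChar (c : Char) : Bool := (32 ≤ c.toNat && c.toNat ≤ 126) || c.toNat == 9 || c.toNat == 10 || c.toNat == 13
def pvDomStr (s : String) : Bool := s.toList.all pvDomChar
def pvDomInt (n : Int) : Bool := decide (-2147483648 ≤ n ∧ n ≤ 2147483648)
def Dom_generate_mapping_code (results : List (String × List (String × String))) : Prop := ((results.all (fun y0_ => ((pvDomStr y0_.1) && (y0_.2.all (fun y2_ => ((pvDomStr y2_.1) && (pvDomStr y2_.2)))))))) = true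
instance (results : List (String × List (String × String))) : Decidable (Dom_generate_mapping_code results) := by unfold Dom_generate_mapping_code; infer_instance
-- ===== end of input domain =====

-- B replaces A's defaultdict-of-sets grouping with sorting the distinct canonical values and a filter per group (objective: simpler).


-- ===== PORT A =====
-- the three fixed header lines (shared constant of both ports)
def pvHeader : List String :=
  ["# AWS API specific variable mappings (auto-discovered)",
   "# Add these to the canonical_to_alternatives dictionary in VariableMapper:",
   ""]

-- port of A: results['suggested_mappings'] is a first-match dict lookup (total via getD; Pre_ excludes the KeyError case),
-- then the defaultdict(set) grouping loop, then the sorted-keys emission loop appending line blocks to code_lines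
def generate_mapping_code (results : List (String × List (String × String))) : String :=
  let mappings := ((PySem.Dict.mk results).get? "suggested_mappings").getD []
  let by_canonical := mappings.foldl
      (fun d p => d.modify p.2 [] (fun s => PySem.Set.add s p.1)) PySem.Dict.empty
  let code_lines := (PySem.List.sorted by_canonical.keys (fun x => x) false).foldl
      (fun acc canonical =>
        let aws_vars := PySem.List.sorted (by_canonical.getD canonical []) (fun x => x) false
        acc ++ (["# AWS API variables for " ++ canonical ++ ":",
                 "'" ++ canonical ++ "': {",
                 "    '" ++ canonical ++ "',  # canonical name"]
            ++ aws_vars.map (fun v => "    '" ++ v ++ "',  # AWS API")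
            ++ ["},", ""])) pvHeader
  PySem.Str.join "\n" code_lines

-- ===== PORT B =====
-- B's block(c) helper: the six-part line block for one canonical, variables by filter
def pvBlock (items : List (String × String)) (c : String) : List String :=
  ["# AWS API variables for " ++ c ++ ":",
   "'" ++ c ++ "': {",
   "    '" ++ c ++ "',  # canonical name"]
  ++ (PySem.List.sorted ((items.filter (fun p => p.2 == c)).map (fun p => p.1)) (fun x => x) false).map
       (fun v => "    '" ++ v ++ "',  # AWS API")
  ++ ["},", ""]

-- port of B: sorted distinct canonical values, header plus the concatenated blocks
def generate_mapping_code_alt (results : List (String × List (String × String))) : String :=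
  let items := ((PySem.Dict.mk results).get? "suggested_mappings").getD []
  let canonicals := PySem.List.sorted (PySem.Set.ofList (items.map (fun p => p.2))) (fun x => x) false
  PySem.Str.join "\n" (pvHeader ++ canonicals.flatMap (pvBlock items))

-- ===== PRECONDITION & SPEC =====
-- Pre_ excludes inputs where A raises KeyError ('suggested_mappings' absent) and association lists whose
-- suggested_mappings value has duplicate aws_var keys, which a real Python dict cannot carry (both programs
-- see the same deduplicated dict there and agree).
def Pre_generate_mapping_code (results : List (String × List (String × String))) : Prop :=
  ((PySem.Dict.mk results).get? "suggested_mappings").isSome = true ∧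
  (((((PySem.Dict.mk results).get? "suggested_mappings").getD []).map Prod.fst).Nodup)
instance (results : List (String × List (String × String))) : Decidable (Pre_generate_mapping_code results) := by
  unfold Pre_generate_mapping_code; infer_instance

def pvWitness_generate_mapping_code : (List (String × List (String × String))) :=
  [("suggested_mappings", [("temp_max", "temperature"), ("wind_spd", "wind_speed")])]

def Spec_generate_mapping_code (results : List (String × List (String × String))) (out : String) : Prop := out = generate_mapping_code_alt results
instance (results : List (String × List (String × String))) (out : String) : Decidable (Spec_generate_mapping_code results out) := by unfold Spec_generate_mapping_code; infer_instance

-- ===== CLAIM (what is proved, stated in full; the proofs are below) =====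
def Claim_equal_generate_mapping_code : Prop := ∀ (results : List (String × List (String × String))), Dom_generate_mapping_code results → Pre_generate_mapping_code results → Spec_generate_mapping_code results (generate_mapping_code results)

-- ===== LEMMAS AND PROOFS =====

-- the grouping loop, read back per key: bucket c collects the first components of the items whose second is c
lemma pvGetD_group (l : List (String × String)) (d : PySem.Dict String (List String)) (c : String) :
    ((l.foldl (fun d p => d.modify p.2 [] (fun s => PySem.Set.add s p.1)) d).getD c []) =
      (l.filter (fun p => p.2 == c)).foldl (fun s p => PySem.Set.add s p.1) (d.getD c []) := by
  induction l generalizing d with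
  | nil => rfl
  | cons p t ih =>
    simp only [List.foldl_cons, List.filter_cons]
    by_cases h : p.2 = c
    · simp [h, ih]
    · have : (p.2 == c) = false := by simp [h]
      simp [this, ih, PySem.Dict.getD_modify, Ne.symm h]

-- under nodup first components the bucket IS the filtered list
lemma pvGetD_group_empty (l : List (String × String)) (c : String)
    (hnd : (l.map Prod.fst).Nodup) :
    ((l.foldl (fun d p => d.modify p.2 [] (fun s => PySem.Set.add s p.1))
        (PySem.Dict.empty : PySem.Dict String (List String))).getD c []) =
      (l.filter (fun p => p.2 == c)).map (fun p => p.1) := by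
  rw [pvGetD_group, PySem.Dict.getD_empty, ← PySem.Set.update_map_eq_foldl_add,
      PySem.Set.update_nil_left]
  apply PySem.Set.ofList_eq_self_of_nodup
  have hsub : (l.filter (fun p => p.2 == c)).Sublist l := List.filter_sublist
  exact (hnd.sublist (hsub.map Prod.fst))

-- ===== VERDICT (by name: the statement is the Claim_ definition above) =====
theorem generate_mapping_code_spec : Claim_equal_generate_mapping_code := by
  intro results _ hpre
  unfold Spec_generate_mapping_code generate_mapping_code generate_mapping_code_alt
  obtain ⟨-, hnd⟩ := hpre
  set items := ((PySem.Dict.mk results).get? "suggested_mappings").getD [] with hitems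
  -- the keys of the grouping dict are the distinct canonicals
  have hkeys : (items.foldl (fun d p => d.modify p.2 [] (fun s => PySem.Set.add s p.1))
      (PySem.Dict.empty : PySem.Dict String (List String))).keys
      = PySem.Set.ofList (items.map (fun p => p.2)) := by
    rw [PySem.Dict.keys_foldl_modify_key]
    simp [PySem.Set.update_nil_left]
  dsimp only
  rw [PySem.List.foldl_append_eq_flatMap, hkeys]
  refine congrArg _ (congrArg _ (List.flatMap_congr ?_))
  intro c _
  unfold pvBlock
  rw [pvGetD_group_empty items c hnd]
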